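-- pv_equiv track=rewrite | github.com/linliu1127/draw-and-win | core/win_checker.py | _check_ranks
-- ===== SOURCE A (Python) =====
-- def _check_ranks(reg_ranks: list[int], n_ghost: int) -> bool:
--     """Try all ghost substitutions and see if any arrangement wins."""
--     if n_ghost == 0:
--         return _is_valid_hand(reg_ranks)
--     if n_ghost == 1:
--         for r in range(1, 14):
--             if _is_valid_hand(reg_ranks + [r]):
--                 return True
--         return False
--     if n_ghost == 2:
--         for r1 in range(1, 14):
--             for r2 in range(1, 14):
--                 if _is_valid_hand(reg_ranks + [r1, r2]):
--                     return True
--         return False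
--     return False
--
-- def _is_valid_hand(ranks: list[int]) -> bool:
--     """Check whether 5 ranks form (one pair) + (one 3-card sequence)."""
--     if len(ranks) != 5:
--         return False
--     for i in range(5):
--         for j in range(i + 1, 5):
--             if ranks[i] == ranks[j]:
--                 remaining = [ranks[k] for k in range(5) if k != i and k != j]
--                 if _is_sequence(remaining):
--                     return True
--     return False
--
-- def _is_sequence(ranks: list[int]) -> bool:
--     """Return True if the 3 ranks are three consecutive integers."""
--     if len(ranks) != 3:
--         return False
--     s = sorted(ranks)
--     return s[1] == s[0] + 1 and s[2] == s[1] + 1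
-- ===== SOURCE B (Python) =====
-- def _check_ranks(reg_ranks: list[int], n_ghost: int) -> bool:
--     """Enumerate target winning hands (pair rank p, run start s) and check
--     whether reg_ranks is coverable with exactly n_ghost wilds (ranks 1..13)."""
--     if n_ghost not in (0, 1, 2) or len(reg_ranks) + n_ghost != 5:
--         return False
--     pair_cands = reg_ranks + list(range(1, 14))
--     start_cands = [v - d for v in reg_ranks for d in (0, 1, 2)]
--     for p in pair_cands:
--         for s in start_cands:
--             if _covers(reg_ranks, p, s):
--                 return True
--     return False
--
-- def _covers(reg_ranks: list[int], p: int, s: int) -> bool: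
--     """Can reg_ranks plus wilds in 1..13 form exactly the multiset {p,p,s,s+1,s+2}?"""
--     need = {p: 2}
--     for r in (s, s + 1, s + 2):
--         need[r] = need.get(r, 0) + 1
--     for r in reg_ranks:
--         if reg_ranks.count(r) > need.get(r, 0):
--             return False
--     for r, k in need.items():
--         if reg_ranks.count(r) < k and not (1 <= r <= 13):
--             return False
--     return True
-- ===== Notes on version B (the rewrite author's own statement) =====
-- stated objective: alternative
-- what changed: Instead of brute-forcing all 13 (or 13x13) ghost substitutions and re-checking every pair split of each 5-card hand, B enumerates candidate target hands (pair rank from the regular cards or 1..13, run start derived from a regular card) and checks by rank counts whether the regular cards plus exactly n_ghost wilds in 1..13 cover the target multiset {p,p,s,s+1,s+2}.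
import Mathlib
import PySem

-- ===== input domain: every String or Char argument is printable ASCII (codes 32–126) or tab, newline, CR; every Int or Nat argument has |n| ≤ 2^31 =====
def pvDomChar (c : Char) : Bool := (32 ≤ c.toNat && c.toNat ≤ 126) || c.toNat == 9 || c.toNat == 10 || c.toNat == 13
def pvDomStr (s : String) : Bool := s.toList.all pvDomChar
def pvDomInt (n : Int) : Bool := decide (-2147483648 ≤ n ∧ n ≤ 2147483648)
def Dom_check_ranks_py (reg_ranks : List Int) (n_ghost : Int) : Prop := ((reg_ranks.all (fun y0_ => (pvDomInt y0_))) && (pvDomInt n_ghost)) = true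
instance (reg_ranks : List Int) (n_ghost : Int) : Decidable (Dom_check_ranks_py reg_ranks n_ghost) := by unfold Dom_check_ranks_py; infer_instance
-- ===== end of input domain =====

-- B replaces A's brute force over all ghost substitutions by enumerating candidate
-- target hands (pair rank, run start) and checking multiset coverage; objective: alternative.

-- ===== PORT A =====
-- port of _is_sequence (indexing via pyGetD: indices 0..2 are in range since length = 3 was checked)
def isSequence (ranks : List Int) : Bool :=
  if ranks.length ≠ 3 then false
  else
    let s := PySem.List.sorted ranks (fun x => x) false
    (PySem.List.pyGetD s 1 0 == PySem.List.pyGetD s 0 0 + 1) &&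
    (PySem.List.pyGetD s 2 0 == PySem.List.pyGetD s 1 0 + 1)

-- port of _is_valid_hand (indices from range(5) are in range since length = 5 was checked)
def isValidHand (ranks : List Int) : Bool :=
  if ranks.length ≠ 5 then false
  else
    (PySem.List.pyRange 0 5 1).any (fun i =>
      (PySem.List.pyRange (i + 1) 5 1).any (fun j =>
        (PySem.List.pyGetD ranks i 0 == PySem.List.pyGetD ranks j 0) &&
        isSequence (((PySem.List.pyRange 0 5 1).filter (fun k => !(k == i) && !(k == j))).map
          (fun k => PySem.List.pyGetD ranks k 0))))

def check_ranks_py (reg_ranks : List Int) (n_ghost : Int) : Bool :=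
  if n_ghost == 0 then isValidHand reg_ranks
  else if n_ghost == 1 then
    (PySem.List.pyRange 1 14 1).any (fun r => isValidHand (reg_ranks ++ [r]))
  else if n_ghost == 2 then
    (PySem.List.pyRange 1 14 1).any (fun r1 =>
      (PySem.List.pyRange 1 14 1).any (fun r2 => isValidHand (reg_ranks ++ [r1, r2])))
  else false

-- ===== PORT B =====
-- port of _covers: early-return-False loops become !any
def covers (reg_ranks : List Int) (p s : Int) : Bool :=
  let target : List Int := [p, p, s, s + 1, s + 2]
  (!(reg_ranks.any (fun r => PySem.List.count target r < PySem.List.count reg_ranks r))) &&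
  (!(target.any (fun r =>
      PySem.List.count reg_ranks r < PySem.List.count target r &&
      !(decide (1 ≤ r) && decide (r ≤ 13)))))

def check_ranks_py_alt (reg_ranks : List Int) (n_ghost : Int) : Bool :=
  if (!(n_ghost == 0 || n_ghost == 1 || n_ghost == 2)) ||
     (PySem.List.len reg_ranks + n_ghost != 5) then false
  else
    let pair_cands := reg_ranks ++ PySem.List.pyRange 1 14 1
    let start_cands := reg_ranks.flatMap (fun v => [(0:Int), 1, 2].map (fun d => v - d))
    pair_cands.any (fun p => start_cands.any (fun s => covers reg_ranks p s))

-- ===== PRECONDITION & SPEC =====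
def Spec_check_ranks_py (reg_ranks : List Int) (n_ghost : Int) (out : Bool) : Prop := out = check_ranks_py_alt reg_ranks n_ghost
instance (reg_ranks : List Int) (n_ghost : Int) (out : Bool) : Decidable (Spec_check_ranks_py reg_ranks n_ghost out) := by unfold Spec_check_ranks_py; infer_instance

-- ===== CLAIM (what is proved, stated in full; the proofs are below) =====
def Claim_equal_check_ranks_py : Prop := ∀ (reg_ranks : List Int) (n_ghost : Int), Dom_check_ranks_py reg_ranks n_ghost → Spec_check_ranks_py reg_ranks n_ghost (check_ranks_py reg_ranks n_ghost)

-- ===== LEMMAS AND PROOFS =====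

-- the target winning multiset for pair rank p and run start s
def Tgt (p s : Int) : List Int := [p, p, s, s + 1, s + 2]

-- the ghost values A's brute force may substitute
def Ghosts (gs : List Int) : Prop := ∀ g ∈ gs, 1 ≤ g ∧ g ≤ 13

lemma seq_iff (l : List Int) : isSequence l = true ↔ ∃ m, l.Perm [m, m + 1, m + 2] := by
  constructor
  · intro h
    unfold isSequence at h
    split at h
    · exact absurd h (by simp)
    · rename_i hl
      simp only [not_not] at hl
      have hperm : (PySem.List.sorted l (fun x => x) false).Perm l :=
        PySem.List.sorted_perm l (fun x => x) false
      have hls : (PySem.List.sorted l (fun x => x) false).length = 3 := by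
        rw [hperm.length_eq, hl]
      obtain ⟨u, v, w, hs⟩ : ∃ u v w, PySem.List.sorted l (fun x => x) false = [u, v, w] := by
        match hse : PySem.List.sorted l (fun x => x) false, hls with
        | [u, v, w], _ => exact ⟨u, v, w, rfl⟩
      rw [hs] at h hperm
      simp only [pysem, Bool.and_eq_true, beq_iff_eq, List.getD] at h
      simp only [List.getElem?_cons_zero, List.getElem?_cons_succ, Option.getD_some] at h
      refine ⟨u, ?_⟩
      obtain ⟨h1, h2⟩ := h
      subst h1 h2
      have e : ([u, u + 1, u + 1 + 1] : List Int) = [u, u + 1, u + 2] := by ring_nf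
      exact e ▸ hperm.symm
  · rintro ⟨m, hp⟩
    have hl : l.length = 3 := by simpa using hp.length_eq
    have hs : PySem.List.sorted l (fun x => x) false = [m, m + 1, m + 2] := by
      refine PySem.List.sorted_eq_of_perm_of_pairwise_lt l [m, m + 1, m + 2] (fun x => x) hp.symm ?_
      simp only [List.pairwise_cons, List.mem_cons]
      refine ⟨?_, ?_, ?_⟩ <;> intros <;> simp_all <;> omega
    unfold isSequence
    rw [if_neg (by omega), hs]
    simp [pysem]
    ring

lemma valid_expand (a b c d e : Int) :
    isValidHand [a, b, c, d, e] =
      ((a == b && isSequence [c, d, e]) || (a == c && isSequence [b, d, e]) ||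
       (a == d && isSequence [b, c, e]) || (a == e && isSequence [b, c, d]) ||
       (b == c && isSequence [a, d, e]) || (b == d && isSequence [a, c, e]) ||
       (b == e && isSequence [a, c, d]) || (c == d && isSequence [a, b, e]) ||
       (c == e && isSequence [a, b, d]) || (d == e && isSequence [a, b, c])) := by
  unfold isValidHand
  rw [if_neg (by simp)]
  rw [show PySem.List.pyRange 0 5 1 = [0, 1, 2, 3, 4] from by decide]
  simp only [List.any_cons, List.any_nil]
  rw [show PySem.List.pyRange (0 + 1) 5 1 = [1, 2, 3, 4] from by decide,
      show PySem.List.pyRange (1 + 1) 5 1 = [2, 3, 4] from by decide,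
      show PySem.List.pyRange (2 + 1) 5 1 = [3, 4] from by decide,
      show PySem.List.pyRange (3 + 1) 5 1 = [4] from by decide,
      show PySem.List.pyRange (4 + 1) 5 1 = [] from by decide]
  simp only [List.any_cons, List.any_nil]
  rw [show (List.filter (fun k => !(k == (0:Int)) && !(k == (1:Int))) [0, 1, 2, 3, 4]) = [2, 3, 4] from by decide,
      show (List.filter (fun k => !(k == (0:Int)) && !(k == (2:Int))) [0, 1, 2, 3, 4]) = [1, 3, 4] from by decide,
      show (List.filter (fun k => !(k == (0:Int)) && !(k == (3:Int))) [0, 1, 2, 3, 4]) = [1, 2, 4] from by decide,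
      show (List.filter (fun k => !(k == (0:Int)) && !(k == (4:Int))) [0, 1, 2, 3, 4]) = [1, 2, 3] from by decide,
      show (List.filter (fun k => !(k == (1:Int)) && !(k == (2:Int))) [0, 1, 2, 3, 4]) = [0, 3, 4] from by decide,
      show (List.filter (fun k => !(k == (1:Int)) && !(k == (3:Int))) [0, 1, 2, 3, 4]) = [0, 2, 4] from by decide,
      show (List.filter (fun k => !(k == (1:Int)) && !(k == (4:Int))) [0, 1, 2, 3, 4]) = [0, 2, 3] from by decide,
      show (List.filter (fun k => !(k == (2:Int)) && !(k == (3:Int))) [0, 1, 2, 3, 4]) = [0, 1, 4] from by decide,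
      show (List.filter (fun k => !(k == (2:Int)) && !(k == (4:Int))) [0, 1, 2, 3, 4]) = [0, 1, 3] from by decide,
      show (List.filter (fun k => !(k == (3:Int)) && !(k == (4:Int))) [0, 1, 2, 3, 4]) = [0, 1, 2] from by decide]
  simp only [List.map_cons, List.map_nil]
  simp only [pysem]
  simp [Bool.or_assoc]

-- at least two of the five cards equal p: the ten possible position pairs
lemma two_count (p a b c d e : Int) (h : 2 ≤ List.count p [a, b, c, d, e]) :
    (a = p ∧ b = p) ∨ (a = p ∧ c = p) ∨ (a = p ∧ d = p) ∨ (a = p ∧ e = p) ∨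
    (b = p ∧ c = p) ∨ (b = p ∧ d = p) ∨ (b = p ∧ e = p) ∨ (c = p ∧ d = p) ∨
    (c = p ∧ e = p) ∨ (d = p ∧ e = p) := by
  simp only [List.count_cons, List.count_nil, beq_iff_eq] at h
  split_ifs at h <;> omega

-- the ten ways to pull a pair of positions to the front of a 5-card hand
lemma permPat01 (a b c d e : Int) : [a, b, c, d, e].Perm (a :: b :: [c, d, e]) :=
  List.Perm.refl _
lemma permPat02 (a b c d e : Int) : [a, b, c, d, e].Perm (a :: c :: [b, d, e]) := by
  rw [List.perm_iff_count]
  intro t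
  simp only [List.count_cons, List.count_nil, beq_iff_eq]
  split_ifs <;> omega
lemma permPat03 (a b c d e : Int) : [a, b, c, d, e].Perm (a :: d :: [b, c, e]) := by
  rw [List.perm_iff_count]
  intro t
  simp only [List.count_cons, List.count_nil, beq_iff_eq]
  split_ifs <;> omega
lemma permPat04 (a b c d e : Int) : [a, b, c, d, e].Perm (a :: e :: [b, c, d]) := by
  rw [List.perm_iff_count]
  intro t
  simp only [List.count_cons, List.count_nil, beq_iff_eq]
  split_ifs <;> omega
lemma permPat12 (a b c d e : Int) : [a, b, c, d, e].Perm (b :: c :: [a, d, e]) := by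
  rw [List.perm_iff_count]
  intro t
  simp only [List.count_cons, List.count_nil, beq_iff_eq]
  split_ifs <;> omega
lemma permPat13 (a b c d e : Int) : [a, b, c, d, e].Perm (b :: d :: [a, c, e]) := by
  rw [List.perm_iff_count]
  intro t
  simp only [List.count_cons, List.count_nil, beq_iff_eq]
  split_ifs <;> omega
lemma permPat14 (a b c d e : Int) : [a, b, c, d, e].Perm (b :: e :: [a, c, d]) := by
  rw [List.perm_iff_count]
  intro t
  simp only [List.count_cons, List.count_nil, beq_iff_eq]
  split_ifs <;> omega
lemma permPat23 (a b c d e : Int) : [a, b, c, d, e].Perm (c :: d :: [a, b, e]) := by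
  rw [List.perm_iff_count]
  intro t
  simp only [List.count_cons, List.count_nil, beq_iff_eq]
  split_ifs <;> omega
lemma permPat24 (a b c d e : Int) : [a, b, c, d, e].Perm (c :: e :: [a, b, d]) := by
  rw [List.perm_iff_count]
  intro t
  simp only [List.count_cons, List.count_nil, beq_iff_eq]
  split_ifs <;> omega
lemma permPat34 (a b c d e : Int) : [a, b, c, d, e].Perm (d :: e :: [a, b, c]) := by
  rw [List.perm_iff_count]
  intro t
  simp only [List.count_cons, List.count_nil, beq_iff_eq]
  split_ifs <;> omega

lemma valid_iff (h : List Int) : isValidHand h = true ↔ ∃ p s, h.Perm (Tgt p s) := by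
  by_cases hl : h.length = 5
  · obtain ⟨a, b, c, d, e, rfl⟩ : ∃ a b c d e, h = [a, b, c, d, e] := by
      match h, hl with
      | [a, b, c, d, e], _ => exact ⟨a, b, c, d, e, rfl⟩
    rw [valid_expand]
    constructor
    · intro H
      simp only [Bool.or_eq_true, Bool.and_eq_true, beq_iff_eq] at H
      rcases H with (((((((((⟨hq, hs⟩ | ⟨hq, hs⟩) | ⟨hq, hs⟩) | ⟨hq, hs⟩) | ⟨hq, hs⟩) | ⟨hq, hs⟩) | ⟨hq, hs⟩) | ⟨hq, hs⟩) | ⟨hq, hs⟩) | ⟨hq, hs⟩)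
      · obtain ⟨m, pr⟩ := (seq_iff [c, d, e]).mp hs
        have h1 : (a :: b :: [c, d, e] : List Int).Perm (a :: a :: [c, d, e]) := by rw [hq]
        exact ⟨a, m, (permPat01 a b c d e).trans (h1.trans ((pr.cons _).cons _))⟩
      · obtain ⟨m, pr⟩ := (seq_iff [b, d, e]).mp hs
        have h1 : (a :: c :: [b, d, e] : List Int).Perm (a :: a :: [b, d, e]) := by rw [hq]
        exact ⟨a, m, (permPat02 a b c d e).trans (h1.trans ((pr.cons _).cons _))⟩
      · obtain ⟨m, pr⟩ := (seq_iff [b, c, e]).mp hs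
        have h1 : (a :: d :: [b, c, e] : List Int).Perm (a :: a :: [b, c, e]) := by rw [hq]
        exact ⟨a, m, (permPat03 a b c d e).trans (h1.trans ((pr.cons _).cons _))⟩
      · obtain ⟨m, pr⟩ := (seq_iff [b, c, d]).mp hs
        have h1 : (a :: e :: [b, c, d] : List Int).Perm (a :: a :: [b, c, d]) := by rw [hq]
        exact ⟨a, m, (permPat04 a b c d e).trans (h1.trans ((pr.cons _).cons _))⟩
      · obtain ⟨m, pr⟩ := (seq_iff [a, d, e]).mp hs
        have h1 : (b :: c :: [a, d, e] : List Int).Perm (b :: b :: [a, d, e]) := by rw [hq]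
        exact ⟨b, m, (permPat12 a b c d e).trans (h1.trans ((pr.cons _).cons _))⟩
      · obtain ⟨m, pr⟩ := (seq_iff [a, c, e]).mp hs
        have h1 : (b :: d :: [a, c, e] : List Int).Perm (b :: b :: [a, c, e]) := by rw [hq]
        exact ⟨b, m, (permPat13 a b c d e).trans (h1.trans ((pr.cons _).cons _))⟩
      · obtain ⟨m, pr⟩ := (seq_iff [a, c, d]).mp hs
        have h1 : (b :: e :: [a, c, d] : List Int).Perm (b :: b :: [a, c, d]) := by rw [hq]
        exact ⟨b, m, (permPat14 a b c d e).trans (h1.trans ((pr.cons _).cons _))⟩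
      · obtain ⟨m, pr⟩ := (seq_iff [a, b, e]).mp hs
        have h1 : (c :: d :: [a, b, e] : List Int).Perm (c :: c :: [a, b, e]) := by rw [hq]
        exact ⟨c, m, (permPat23 a b c d e).trans (h1.trans ((pr.cons _).cons _))⟩
      · obtain ⟨m, pr⟩ := (seq_iff [a, b, d]).mp hs
        have h1 : (c :: e :: [a, b, d] : List Int).Perm (c :: c :: [a, b, d]) := by rw [hq]
        exact ⟨c, m, (permPat24 a b c d e).trans (h1.trans ((pr.cons _).cons _))⟩
      · obtain ⟨m, pr⟩ := (seq_iff [a, b, c]).mp hs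
        have h1 : (d :: e :: [a, b, c] : List Int).Perm (d :: d :: [a, b, c]) := by rw [hq]
        exact ⟨d, m, (permPat34 a b c d e).trans (h1.trans ((pr.cons _).cons _))⟩
    · rintro ⟨p, s, hp⟩
      have hcnt2 : 2 ≤ List.count p [a, b, c, d, e] := by
        rw [hp.count_eq]
        simp [Tgt, List.count_cons]
      simp only [Tgt] at hp
      rcases two_count p a b c d e hcnt2 with hc | hc | hc | hc | hc | hc | hc | hc | hc | hc
      · obtain ⟨e1, e2⟩ := hc
        have h0 := permPat01 a b c d e
        have h1 : (a :: b :: [c, d, e] : List Int).Perm (p :: p :: [c, d, e]) := by rw [e1, e2]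
        have h2 : ([c, d, e] : List Int).Perm [s, s + 1, s + 2] :=
          ((h1.symm.trans (h0.symm.trans hp)).cons_inv).cons_inv
        have hX : (a == b && isSequence [c, d, e]) = true := by
          rw [Bool.and_eq_true, beq_iff_eq]
          exact ⟨by omega, (seq_iff [c, d, e]).mpr ⟨s, h2⟩⟩
        simp only [hX, Bool.or_true, Bool.true_or]
      · obtain ⟨e1, e2⟩ := hc
        have h0 := permPat02 a b c d e
        have h1 : (a :: c :: [b, d, e] : List Int).Perm (p :: p :: [b, d, e]) := by rw [e1, e2]
        have h2 : ([b, d, e] : List Int).Perm [s, s + 1, s + 2] :=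
          ((h1.symm.trans (h0.symm.trans hp)).cons_inv).cons_inv
        have hX : (a == c && isSequence [b, d, e]) = true := by
          rw [Bool.and_eq_true, beq_iff_eq]
          exact ⟨by omega, (seq_iff [b, d, e]).mpr ⟨s, h2⟩⟩
        simp only [hX, Bool.or_true, Bool.true_or]
      · obtain ⟨e1, e2⟩ := hc
        have h0 := permPat03 a b c d e
        have h1 : (a :: d :: [b, c, e] : List Int).Perm (p :: p :: [b, c, e]) := by rw [e1, e2]
        have h2 : ([b, c, e] : List Int).Perm [s, s + 1, s + 2] :=
          ((h1.symm.trans (h0.symm.trans hp)).cons_inv).cons_inv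
        have hX : (a == d && isSequence [b, c, e]) = true := by
          rw [Bool.and_eq_true, beq_iff_eq]
          exact ⟨by omega, (seq_iff [b, c, e]).mpr ⟨s, h2⟩⟩
        simp only [hX, Bool.or_true, Bool.true_or]
      · obtain ⟨e1, e2⟩ := hc
        have h0 := permPat04 a b c d e
        have h1 : (a :: e :: [b, c, d] : List Int).Perm (p :: p :: [b, c, d]) := by rw [e1, e2]
        have h2 : ([b, c, d] : List Int).Perm [s, s + 1, s + 2] :=
          ((h1.symm.trans (h0.symm.trans hp)).cons_inv).cons_inv
        have hX : (a == e && isSequence [b, c, d]) = true := by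
          rw [Bool.and_eq_true, beq_iff_eq]
          exact ⟨by omega, (seq_iff [b, c, d]).mpr ⟨s, h2⟩⟩
        simp only [hX, Bool.or_true, Bool.true_or]
      · obtain ⟨e1, e2⟩ := hc
        have h0 := permPat12 a b c d e
        have h1 : (b :: c :: [a, d, e] : List Int).Perm (p :: p :: [a, d, e]) := by rw [e1, e2]
        have h2 : ([a, d, e] : List Int).Perm [s, s + 1, s + 2] :=
          ((h1.symm.trans (h0.symm.trans hp)).cons_inv).cons_inv
        have hX : (b == c && isSequence [a, d, e]) = true := by
          rw [Bool.and_eq_true, beq_iff_eq]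
          exact ⟨by omega, (seq_iff [a, d, e]).mpr ⟨s, h2⟩⟩
        simp only [hX, Bool.or_true, Bool.true_or]
      · obtain ⟨e1, e2⟩ := hc
        have h0 := permPat13 a b c d e
        have h1 : (b :: d :: [a, c, e] : List Int).Perm (p :: p :: [a, c, e]) := by rw [e1, e2]
        have h2 : ([a, c, e] : List Int).Perm [s, s + 1, s + 2] :=
          ((h1.symm.trans (h0.symm.trans hp)).cons_inv).cons_inv
        have hX : (b == d && isSequence [a, c, e]) = true := by
          rw [Bool.and_eq_true, beq_iff_eq]
          exact ⟨by omega, (seq_iff [a, c, e]).mpr ⟨s, h2⟩⟩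
        simp only [hX, Bool.or_true, Bool.true_or]
      · obtain ⟨e1, e2⟩ := hc
        have h0 := permPat14 a b c d e
        have h1 : (b :: e :: [a, c, d] : List Int).Perm (p :: p :: [a, c, d]) := by rw [e1, e2]
        have h2 : ([a, c, d] : List Int).Perm [s, s + 1, s + 2] :=
          ((h1.symm.trans (h0.symm.trans hp)).cons_inv).cons_inv
        have hX : (b == e && isSequence [a, c, d]) = true := by
          rw [Bool.and_eq_true, beq_iff_eq]
          exact ⟨by omega, (seq_iff [a, c, d]).mpr ⟨s, h2⟩⟩
        simp only [hX, Bool.or_true, Bool.true_or]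
      · obtain ⟨e1, e2⟩ := hc
        have h0 := permPat23 a b c d e
        have h1 : (c :: d :: [a, b, e] : List Int).Perm (p :: p :: [a, b, e]) := by rw [e1, e2]
        have h2 : ([a, b, e] : List Int).Perm [s, s + 1, s + 2] :=
          ((h1.symm.trans (h0.symm.trans hp)).cons_inv).cons_inv
        have hX : (c == d && isSequence [a, b, e]) = true := by
          rw [Bool.and_eq_true, beq_iff_eq]
          exact ⟨by omega, (seq_iff [a, b, e]).mpr ⟨s, h2⟩⟩
        simp only [hX, Bool.or_true, Bool.true_or]
      · obtain ⟨e1, e2⟩ := hc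
        have h0 := permPat24 a b c d e
        have h1 : (c :: e :: [a, b, d] : List Int).Perm (p :: p :: [a, b, d]) := by rw [e1, e2]
        have h2 : ([a, b, d] : List Int).Perm [s, s + 1, s + 2] :=
          ((h1.symm.trans (h0.symm.trans hp)).cons_inv).cons_inv
        have hX : (c == e && isSequence [a, b, d]) = true := by
          rw [Bool.and_eq_true, beq_iff_eq]
          exact ⟨by omega, (seq_iff [a, b, d]).mpr ⟨s, h2⟩⟩
        simp only [hX, Bool.or_true, Bool.true_or]
      · obtain ⟨e1, e2⟩ := hc
        have h0 := permPat34 a b c d e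
        have h1 : (d :: e :: [a, b, c] : List Int).Perm (p :: p :: [a, b, c]) := by rw [e1, e2]
        have h2 : ([a, b, c] : List Int).Perm [s, s + 1, s + 2] :=
          ((h1.symm.trans (h0.symm.trans hp)).cons_inv).cons_inv
        have hX : (d == e && isSequence [a, b, c]) = true := by
          rw [Bool.and_eq_true, beq_iff_eq]
          exact ⟨by omega, (seq_iff [a, b, c]).mpr ⟨s, h2⟩⟩
        simp only [hX, Bool.or_true, Bool.true_or]
  · rw [isValidHand, if_pos (by omega)]
    constructor
    · intro H
      exact absurd H (by simp)
    · rintro ⟨p, s, hp⟩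
      have := hp.length_eq
      simp [Tgt] at this
      omega

lemma covers_iff (reg : List Int) (p s : Int) :
    covers reg p s = true ↔
      ((∀ r ∈ reg, reg.count r ≤ (Tgt p s).count r) ∧
       (∀ r ∈ Tgt p s, reg.count r < (Tgt p s).count r → 1 ≤ r ∧ r ≤ 13)) := by
  unfold covers Tgt
  simp only [PySem.List.count_eq, Bool.and_eq_true, Bool.not_eq_true', List.any_eq_false,
    Bool.and_eq_false_iff, not_lt, decide_eq_false_iff_not, decide_eq_true_eq]
  constructor <;> rintro ⟨h1, h2⟩ <;>
    refine ⟨fun r hr => by simpa using h1 r hr, fun r hr => ?_⟩ <;> have := h2 r hr <;> tauto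

lemma three_distinct_not_in_two (x y z : Int) (l : List Int) (hl : l.length ≤ 2)
    (hx : x ∈ l) (hy : y ∈ l) (hz : z ∈ l) (hxy : x ≠ y) (hxz : x ≠ z) (hyz : y ≠ z) :
    False := by
  rcases l with _ | ⟨a, _ | ⟨b, t⟩⟩ <;> simp_all <;> omega

lemma covers_to_wins (reg : List Int) (p s : Int) (hc : covers reg p s = true) :
    ∃ gs : List Int, reg.length + gs.length = 5 ∧ Ghosts gs ∧ (reg ++ gs).Perm (Tgt p s) := by
  obtain ⟨h1, h2⟩ := (covers_iff reg p s).mp hc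
  refine ⟨(Tgt p s).diff reg, ?_, ?_, ?_⟩
  · have := (List.subperm_append_diff_self_of_count_le h1).length_eq
    simp only [List.length_append] at this ⊢
    simpa [Tgt] using this
  · intro g hg
    have hperm := List.subperm_append_diff_self_of_count_le h1
    have hcnt : ∀ x : Int, reg.count x + ((Tgt p s).diff reg).count x = (Tgt p s).count x := by
      intro x
      have := hperm.count_eq x
      simpa [List.count_append] using this
    have hg1 : 1 ≤ ((Tgt p s).diff reg).count g := List.count_pos_iff.mpr hg
    have hlt : reg.count g < (Tgt p s).count g := by have := hcnt g; omega
    have hmem : g ∈ Tgt p s := List.count_pos_iff.mp (by omega)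
    exact h2 g hmem hlt
  · exact List.subperm_append_diff_self_of_count_le h1

lemma wins_to_covers (reg gs : List Int) (hg : Ghosts gs) (hlen : gs.length ≤ 2)
    (p s : Int) (hperm : (reg ++ gs).Perm (Tgt p s)) :
    p ∈ reg ++ PySem.List.pyRange 1 14 1 ∧
    s ∈ reg.flatMap (fun v => [(0:Int), 1, 2].map (fun d => v - d)) ∧
    covers reg p s = true := by
  have hcnt : ∀ x : Int, reg.count x + gs.count x = (Tgt p s).count x := by
    intro x
    have := hperm.count_eq x
    simpa [List.count_append] using this
  refine ⟨?_, ?_, ?_⟩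
  · -- p is a regular card or among the ghosts (hence 1..13)
    have hp2 : 2 ≤ (Tgt p s).count p := by simp [Tgt, List.count_cons]
    have : p ∈ reg ∨ p ∈ gs := by
      have := hcnt p
      by_contra hc
      rw [not_or] at hc
      have e1 : reg.count p = 0 := List.count_eq_zero.mpr hc.1
      have e2 : gs.count p = 0 := List.count_eq_zero.mpr hc.2
      omega
    rcases this with h | h
    · exact List.mem_append_left _ h
    · refine List.mem_append_right _ ?_
      have := hg p h
      rw [PySem.List.mem_pyRange_one]
      omega
  · -- at least one of the run cards s, s+1, s+2 is a regular card
    have hmem : ∀ d : Int, d = 0 ∨ d = 1 ∨ d = 2 → (s + d) ∈ reg ∨ (s + d) ∈ gs := by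
      intro d hd
      have h1 : 1 ≤ (Tgt p s).count (s + d) := by
        rcases hd with rfl | rfl | rfl <;> simp [Tgt, List.count_cons] <;> omega
      have := hcnt (s + d)
      by_contra hc
      rw [not_or] at hc
      have e1 : reg.count (s + d) = 0 := List.count_eq_zero.mpr hc.1
      have e2 : gs.count (s + d) = 0 := List.count_eq_zero.mpr hc.2
      omega
    have : (s ∈ reg) ∨ (s + 1) ∈ reg ∨ (s + 2) ∈ reg := by
      by_contra hc
      simp only [not_or] at hc
      have m0 := (hmem 0 (by omega)).resolve_left (by simpa using hc.1)
      have m1 := (hmem 1 (by omega)).resolve_left hc.2.1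
      have m2 := (hmem 2 (by omega)).resolve_left hc.2.2
      exact three_distinct_not_in_two s (s + 1) (s + 2) gs hlen (by simpa using m0) m1 m2
        (by omega) (by omega) (by omega)
    rw [List.mem_flatMap]
    rcases this with h | h | h
    · exact ⟨s, h, by simp⟩
    · exact ⟨s + 1, h, by norm_num⟩
    · exact ⟨s + 2, h, by norm_num⟩
  · rw [covers_iff]
    refine ⟨fun r hr => by have := hcnt r; omega, fun r hr hlt => ?_⟩
    have : 1 ≤ gs.count r := by have := hcnt r; omega
    exact hg r (List.count_pos_iff.mp this)

lemma bridge (reg : List Int) (k : Nat) (hk : k ≤ 2) (hlen : reg.length + k = 5) :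
    ((reg ++ PySem.List.pyRange 1 14 1).any (fun p =>
      (reg.flatMap (fun v => [(0:Int), 1, 2].map (fun d => v - d))).any
        (fun s => covers reg p s)) = true)
    ↔ ∃ gs : List Int, gs.length = k ∧ Ghosts gs ∧ ∃ p s, (reg ++ gs).Perm (Tgt p s) := by
  rw [List.any_eq_true]
  constructor
  · rintro ⟨p, hpmem, hinner⟩
    rw [List.any_eq_true] at hinner
    obtain ⟨s, hsmem, hcov⟩ := hinner
    obtain ⟨gs, hl5, hgh, hp⟩ := covers_to_wins reg p s hcov
    exact ⟨gs, by omega, hgh, p, s, hp⟩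
  · rintro ⟨gs, hlgs, hgh, p, s, hp⟩
    obtain ⟨hpc, hsc, hcov⟩ := wins_to_covers reg gs hgh (by omega) p s hp
    exact ⟨p, hpc, List.any_eq_true.mpr ⟨s, hsc, hcov⟩⟩

lemma main_eq (reg : List Int) (n : Int) : check_ranks_py reg n = check_ranks_py_alt reg n := by
  by_cases hgate : (n = 0 ∨ n = 1 ∨ n = 2) ∧ (reg.length : Int) + n = 5
  · obtain ⟨hn, hlen⟩ := hgate
    rw [check_ranks_py_alt, if_neg (by simp [PySem.List.len_eq]; omega)]
    rcases hn with rfl | rfl | rfl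
    · -- n = 0
      have hl : reg.length = 5 := by omega
      rw [check_ranks_py, if_pos (by decide)]
      rw [Bool.eq_iff_iff, valid_iff, bridge reg 0 (by omega) (by omega)]
      constructor
      · rintro ⟨p, s, hp⟩
        exact ⟨[], rfl, by simp [Ghosts], p, s, by simpa using hp⟩
      · rintro ⟨gs, hlgs, hgh, p, s, hp⟩
        rw [List.length_eq_zero_iff] at hlgs
        subst hlgs
        exact ⟨p, s, by simpa using hp⟩
    · -- n = 1
      rw [check_ranks_py, if_neg (by decide), if_pos (by decide)]
      rw [Bool.eq_iff_iff, List.any_eq_true, bridge reg 1 (by omega) (by omega)]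
      constructor
      · rintro ⟨r, hrmem, hval⟩
        rw [PySem.List.mem_pyRange_one] at hrmem
        obtain ⟨p, s, hp⟩ := (valid_iff _).mp hval
        exact ⟨[r], rfl, by intro g hg; simp at hg; omega, p, s, hp⟩
      · rintro ⟨gs, hlgs, hgh, p, s, hp⟩
        rw [List.length_eq_one_iff] at hlgs
        obtain ⟨r, rfl⟩ := hlgs
        have := hgh r (by simp)
        refine ⟨r, ?_, (valid_iff _).mpr ⟨p, s, hp⟩⟩
        rw [PySem.List.mem_pyRange_one]
        omega
    · -- n = 2
      rw [check_ranks_py, if_neg (by decide), if_neg (by decide), if_pos (by decide)]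
      rw [Bool.eq_iff_iff, List.any_eq_true, bridge reg 2 (by omega) (by omega)]
      constructor
      · rintro ⟨r1, hr1, hin⟩
        rw [List.any_eq_true] at hin
        obtain ⟨r2, hr2, hval⟩ := hin
        rw [PySem.List.mem_pyRange_one] at hr1 hr2
        obtain ⟨p, s, hp⟩ := (valid_iff _).mp hval
        exact ⟨[r1, r2], rfl, by intro g hg; simp at hg; rcases hg with rfl | rfl <;> omega, p, s, hp⟩
      · rintro ⟨gs, hlgs, hgh, p, s, hp⟩
        rcases gs with _ | ⟨g1, _ | ⟨g2, _ | _⟩⟩ <;> simp at hlgs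
        have h1 := hgh g1 (by simp)
        have h2 := hgh g2 (by simp)
        refine ⟨g1, ?_, List.any_eq_true.mpr ⟨g2, ?_, (valid_iff _).mpr ⟨p, s, hp⟩⟩⟩ <;>
          rw [PySem.List.mem_pyRange_one] <;> omega
  · -- the gate fails: both sides are false
    rw [check_ranks_py_alt, if_pos (by simp [PySem.List.len_eq]; omega)]
    have hval_false : ∀ h : List Int, h.length ≠ 5 → isValidHand h = false := by
      intro h hne
      rw [isValidHand, if_pos (by omega)]
    by_cases h0 : n = 0
    · subst h0
      rw [check_ranks_py, if_pos (by decide)]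
      have hl5 : (reg.length : Int) + 0 ≠ 5 := by simpa using hgate
      apply hval_false
      omega
    · by_cases h1 : n = 1
      · subst h1
        rw [check_ranks_py, if_neg (by decide), if_pos (by decide)]
        have hl5 : (reg.length : Int) + 1 ≠ 5 := by simpa using hgate
        rw [List.any_eq_false]
        intro r _
        simp only [Bool.not_eq_true]
        apply hval_false
        simp only [List.length_append, List.length_cons, List.length_nil]
        omega
      · by_cases h2 : n = 2
        · subst h2
          rw [check_ranks_py, if_neg (by decide), if_neg (by decide), if_pos (by decide)]
          have hl5 : (reg.length : Int) + 2 ≠ 5 := by simpa using hgate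
          rw [List.any_eq_false]
          intro r1 _
          simp only [Bool.not_eq_true]
          rw [List.any_eq_false]
          intro r2 _
          simp only [Bool.not_eq_true]
          apply hval_false
          simp only [List.length_append, List.length_cons, List.length_nil]
          omega
        · rw [check_ranks_py, if_neg (by simpa using h0), if_neg (by simpa using h1),
            if_neg (by simpa using h2)]

-- ===== VERDICT (by name: the statement is the Claim_ definition above) =====
theorem check_ranks_py_spec : Claim_equal_check_ranks_py := by
  intro reg_ranks n_ghost _
  unfold Spec_check_ranks_py
  exact main_eq reg_ranks n_ghost
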